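-- pv_equiv track=rewrite | github.com/egorjke93/network-automatisation | core/constants.py | get_vendor_by_platform
-- ===== SOURCE A (Python) =====
-- from typing import Any, Dict, List
--
-- VENDOR_MAP: Dict[str, List[str]] = {
--     "cisco": [
--         "cisco_ios",
--         "cisco_iosxe",
--         "cisco_xe",
--         "cisco_iosxr",
--         "cisco_xr",
--         "cisco_nxos",
--         "cisco_asa",
--     ],
--     "arista": ["arista_eos"],
--     "juniper": ["juniper", "juniper_junos"],
--     "huawei": ["huawei", "huawei_vrp"],
--     "eltex": ["eltex", "eltex_mes"],
--     "mikrotik": ["mikrotik_routeros"],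
--     "fortinet": ["fortinet"],
--     "paloalto": ["paloalto_panos"],
--     "qtech": ["qtech", "qtech_qsw"],
-- }
--
-- def get_vendor_by_platform(platform: str) -> str:
--     """
--     Определяет вендора по платформе.
--
--     Args:
--         platform: Платформа устройства (cisco_ios, arista_eos, etc.)
--
--     Returns:
--         str: Название вендора
--     """
--     if not platform:
--         return "unknown"
--
--     platform_lower = platform.lower()
--     for vendor, platforms in VENDOR_MAP.items():
--         if platform_lower in platforms:
--             return vendor
--
--     # Пробуем извлечь из platform
--     return platform.split("_")[0]
-- ===== SOURCE B (Python) =====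
-- from typing import Dict, List
--
-- VENDOR_MAP: Dict[str, List[str]] = {
--     "cisco": [
--         "cisco_ios",
--         "cisco_iosxe",
--         "cisco_xe",
--         "cisco_iosxr",
--         "cisco_xr",
--         "cisco_nxos",
--         "cisco_asa",
--     ],
--     "arista": ["arista_eos"],
--     "juniper": ["juniper", "juniper_junos"],
--     "huawei": ["huawei", "huawei_vrp"],
--     "eltex": ["eltex", "eltex_mes"],
--     "mikrotik": ["mikrotik_routeros"],
--     "fortinet": ["fortinet"],
--     "paloalto": ["paloalto_panos"],
--     "qtech": ["qtech", "qtech_qsw"],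
-- }
--
-- # Flat set of all known platform strings; the vendor is never looked up in a
-- # table — it is the prefix token of the platform string itself (every entry of
-- # VENDOR_MAP starts with its vendor name followed by '_' or end of string).
-- _KNOWN_PLATFORMS = frozenset(p for ps in VENDOR_MAP.values() for p in ps)
--
-- def get_vendor_by_platform(platform: str) -> str:
--     if not platform:
--         return "unknown"
--     platform_lower = platform.lower()
--     source = platform_lower if platform_lower in _KNOWN_PLATFORMS else platform
--     return source.split("_")[0]
-- ===== Notes on version B (the rewrite author's own statement) =====
-- stated objective: alternative
-- what changed: B never scans or looks up the vendor table: it extracts the vendor as the first underscore-separated token of the platform string itself (valid because every VENDOR_MAP entry starts with its vendor name), using a flat set of known platform strings only to decide whether the lowered or the original string supplies that token.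
import Mathlib
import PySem

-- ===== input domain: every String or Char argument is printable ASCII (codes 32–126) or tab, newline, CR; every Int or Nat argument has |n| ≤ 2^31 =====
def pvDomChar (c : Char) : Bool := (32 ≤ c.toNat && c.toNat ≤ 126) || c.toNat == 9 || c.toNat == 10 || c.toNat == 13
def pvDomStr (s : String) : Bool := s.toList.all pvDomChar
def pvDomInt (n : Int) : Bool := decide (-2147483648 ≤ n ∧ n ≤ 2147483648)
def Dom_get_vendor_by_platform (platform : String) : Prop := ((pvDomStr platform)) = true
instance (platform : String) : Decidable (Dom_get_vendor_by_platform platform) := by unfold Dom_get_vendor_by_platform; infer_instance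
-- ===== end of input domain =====

-- B derives the vendor from the platform string's own first underscore-separated token instead of scanning the vendor table (alternative decomposition, similar cost).


-- ===== PORT A =====
-- VENDOR_MAP as an association list in insertion order
def VENDOR_MAP : List (String × List String) :=
  [("cisco", ["cisco_ios", "cisco_iosxe", "cisco_xe", "cisco_iosxr", "cisco_xr", "cisco_nxos", "cisco_asa"]),
   ("arista", ["arista_eos"]),
   ("juniper", ["juniper", "juniper_junos"]),
   ("huawei", ["huawei", "huawei_vrp"]),
   ("eltex", ["eltex", "eltex_mes"]),
   ("mikrotik", ["mikrotik_routeros"]),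
   ("fortinet", ["fortinet"]),
   ("paloalto", ["paloalto_panos"]),
   ("qtech", ["qtech", "qtech_qsw"])]

-- the for-loop with early return: first vendor whose platform list contains platform_lower
def pyVendorLoop (platform_lower : String) : List (String × List String) → Option String
  | [] => none
  | (vendor, platforms) :: rest =>
      if platform_lower ∈ platforms then some vendor else pyVendorLoop platform_lower rest

def get_vendor_by_platform (platform : String) : String :=
  if platform = "" then "unknown"
  else
    let platform_lower := PySem.Str.lower platform
    match pyVendorLoop platform_lower VENDOR_MAP with
    | some vendor => vendor
    -- platform.split("_")[0]: split with non-empty sep always yields a non-empty list, so [0] is its head (exact)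
    | none => ((PySem.Str.split? platform "_").getD []).headD ""

-- ===== PORT B =====
-- flat set of all known platform strings (frozenset built once at module level)
def KNOWN_PLATFORMS : PySem.Set String :=
  PySem.Set.ofList
    ["cisco_ios", "cisco_iosxe", "cisco_xe", "cisco_iosxr", "cisco_xr", "cisco_nxos", "cisco_asa",
     "arista_eos", "juniper", "juniper_junos", "huawei", "huawei_vrp", "eltex", "eltex_mes",
     "mikrotik_routeros", "fortinet", "paloalto_panos", "qtech", "qtech_qsw"]

def get_vendor_by_platform_alt (platform : String) : String :=
  if platform = "" then "unknown"
  else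
    let platform_lower := PySem.Str.lower platform
    let source := if PySem.Set.contains KNOWN_PLATFORMS platform_lower then platform_lower else platform
    -- source.split("_")[0]: split with non-empty sep always yields a non-empty list, so [0] is its head (exact)
    ((PySem.Str.split? source "_").getD []).headD ""

-- ===== PRECONDITION & SPEC =====
def Spec_get_vendor_by_platform (platform : String) (out : String) : Prop := out = get_vendor_by_platform_alt platform
instance (platform : String) (out : String) : Decidable (Spec_get_vendor_by_platform platform out) := by unfold Spec_get_vendor_by_platform; infer_instance

-- ===== CLAIM (what is proved, stated in full; the proofs are below) =====
def Claim_equal_get_vendor_by_platform : Prop := ∀ (platform : String), Dom_get_vendor_by_platform platform → Spec_get_vendor_by_platform platform (get_vendor_by_platform platform)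

-- ===== LEMMAS AND PROOFS =====
-- head token of s, as both ports compute the fallback
def headTok (s : String) : String := ((PySem.Str.split? s "_").getD []).headD ""

-- the core fact: A's table scan equals B's "known → head token of the lowered string" rule
theorem loop_eq_head (pl fb : String) :
    (match pyVendorLoop pl VENDOR_MAP with
     | some vendor => vendor
     | none => fb)
      = if PySem.Set.contains KNOWN_PLATFORMS pl then headTok pl else fb := by
  simp only [pyVendorLoop, VENDOR_MAP, List.mem_cons, List.not_mem_nil, or_false]
  by_cases h1 : pl = "cisco_ios" ∨ pl = "cisco_iosxe" ∨ pl = "cisco_xe" ∨ pl = "cisco_iosxr" ∨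
      pl = "cisco_xr" ∨ pl = "cisco_nxos" ∨ pl = "cisco_asa"
  · rcases h1 with rfl|rfl|rfl|rfl|rfl|rfl|rfl <;> rfl
  · rw [if_neg h1]
    by_cases h2 : pl = "arista_eos"
    · subst h2; rfl
    · rw [if_neg h2]
      by_cases h3 : pl = "juniper" ∨ pl = "juniper_junos"
      · rcases h3 with rfl|rfl <;> rfl
      · rw [if_neg h3]
        by_cases h4 : pl = "huawei" ∨ pl = "huawei_vrp"
        · rcases h4 with rfl|rfl <;> rfl
        · rw [if_neg h4]
          by_cases h5 : pl = "eltex" ∨ pl = "eltex_mes"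
          · rcases h5 with rfl|rfl <;> rfl
          · rw [if_neg h5]
            by_cases h6 : pl = "mikrotik_routeros"
            · subst h6; rfl
            · rw [if_neg h6]
              by_cases h7 : pl = "fortinet"
              · subst h7; rfl
              · rw [if_neg h7]
                by_cases h8 : pl = "paloalto_panos"
                · subst h8; rfl
                · rw [if_neg h8]
                  by_cases h9 : pl = "qtech" ∨ pl = "qtech_qsw"
                  · rcases h9 with rfl|rfl <;> rfl
                  · rw [if_neg h9]
                    have hc : PySem.Set.contains KNOWN_PLATFORMS pl = false := by
                      simp only [KNOWN_PLATFORMS, PySem.Set.contains]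
                      simp only [List.contains_eq_mem, decide_eq_false_iff_not]
                      intro hm
                      simp only [PySem.Set.ofList] at hm
                      fin_cases hm <;> simp_all
                    rw [hc]; rfl

-- ===== VERDICT (by name: the statement is the Claim_ definition above) =====
theorem get_vendor_by_platform_spec : Claim_equal_get_vendor_by_platform := by
  intro platform _
  unfold Spec_get_vendor_by_platform get_vendor_by_platform get_vendor_by_platform_alt
  by_cases h : platform = ""
  · simp [h]
  · simp only [h, if_false]
    have := loop_eq_head (PySem.Str.lower platform)
      (((PySem.Str.split? platform "_").getD []).headD "")
    rw [this]
    unfold headTok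
    split <;> rfl
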